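-- pv_equiv track=rewrite | github.com/shasfin/2023-advent-of-code | day13_b.py | find_symmetry_column
-- ===== SOURCE A (Python) =====
-- def find_symmetry_column(field):
--     candidate_symmetry_columns = []
--     for j in range(len(field[0])-1):
--         if all(field[i][j] == field[i][j+1] for i in range(len(field))):
--             candidate_symmetry_columns.append(j)
--
--     for symmetry_column in candidate_symmetry_columns:
--         all_equal = True
--         for offset in range(symmetry_column+1):
--             if any(field[i][symmetry_column-offset] != field[i][symmetry_column+1+offset] for i in range(len(field)) if 0 <= symmetry_column-offset and symmetry_column+1+offset < len(field[0])):
--                 all_equal = False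
--         if all_equal:
--             return symmetry_column + 1
--
--     return 0
-- ===== SOURCE B (Python) =====
-- def find_symmetry_column(field):
--     w = len(field[0])
--     cols = [tuple(row[j] for row in field) for j in range(w)]
--     for c in range(1, w):
--         k = min(c, w - c)
--         if all(cols[c - 1 - i] == cols[c + i] for i in range(k)):
--             return c
--     return 0
-- ===== Notes on version B (the rewrite author's own statement) =====
-- stated objective: alternative
-- what changed: B transposes the grid into column tuples once and does a single scan over axes, checking the mirror condition by whole-column equality, instead of A's two-pass scheme (per-row adjacent-column prefilter, then a nested row-by-row verification per candidate); Pre_ excludes the empty list and ragged grids with a row shorter than the first row, where A raises IndexError or returns only by short-circuiting before the out-of-range access while B's eager transpose raises.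
-- outside the precondition, e.g. on find_symmetry_column(['a9zc', '', '', 'b', '', 'zyc1']): A returns 0, B raises IndexError
import Mathlib
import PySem

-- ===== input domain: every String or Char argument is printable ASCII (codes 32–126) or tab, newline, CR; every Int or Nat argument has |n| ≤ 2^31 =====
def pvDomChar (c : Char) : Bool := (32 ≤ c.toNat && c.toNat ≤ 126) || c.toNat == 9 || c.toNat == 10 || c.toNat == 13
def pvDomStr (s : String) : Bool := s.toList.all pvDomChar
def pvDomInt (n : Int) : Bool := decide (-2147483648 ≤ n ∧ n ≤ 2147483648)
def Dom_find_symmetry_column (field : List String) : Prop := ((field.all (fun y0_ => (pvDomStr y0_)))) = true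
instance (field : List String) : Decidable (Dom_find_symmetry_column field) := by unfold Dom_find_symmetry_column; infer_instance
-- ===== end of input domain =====

-- B transposes the grid into column lists once and scans axes left to right, checking the
-- mirror condition by whole-column equality; A prefilters adjacent-equal column pairs and
-- then verifies each candidate with nested per-row loops.  Objective: alternative algorithm.

-- ===== PORT A =====
-- field[i][j] as a character; in range under Pre_ (default never read there)
def pvCharA (field : List String) (i j : Nat) : Char :=
  ((field.getD i "").toList).getD j ' '

-- the second for-loop of A: walk the candidate list, early return on success
def pvGoA (field : List String) (n w : Nat) : List Nat → Int
  | [] => 0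
  | sc :: rest =>
    let all_equal := (List.range (sc + 1)).foldl (fun (ae : Bool) (offset : Nat) =>
      if (List.range n).any (fun i =>
           decide ((0:Int) ≤ (sc:Int) - (offset:Int) ∧ (sc:Int) + 1 + (offset:Int) < (w:Int)) &&
           (pvCharA field i (sc - offset) != pvCharA field i (sc + 1 + offset)))
      then false else ae) true
    if all_equal then (sc : Int) + 1 else pvGoA field n w rest

def find_symmetry_column (field : List String) : Int :=
  let n := field.length
  let w := (field.headD "").toList.length          -- len(field[0]); field nonempty under Pre_
  let candidate_symmetry_columns := (List.range (w - 1)).foldl (fun acc j =>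
    if (List.range n).all (fun i => pvCharA field i j == pvCharA field i (j + 1))
    then acc ++ [j] else acc) []
  pvGoA field n w candidate_symmetry_columns

-- ===== PORT B =====
-- column j of the grid (Source B's tuple(row[j] for row in field))
def pvCol (field : List String) (j : Nat) : List Char :=
  field.map (fun row => row.toList.getD j ' ')

-- Source B's for-loop over axes c = 1 .. w-1 with early return
def pvGoB (cols : List (List Char)) (w : Nat) : List Nat → Int
  | [] => 0
  | c :: rest =>
    let k := min c (w - c)
    if (List.range k).all (fun i => cols.getD (c - 1 - i) [] == cols.getD (c + i) [])
    then (c : Int) else pvGoB cols w rest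

def find_symmetry_column_alt (field : List String) : Int :=
  let w := (field.headD "").toList.length
  let cols := (List.range w).map (pvCol field)
  pvGoB cols w (List.range' 1 (w - 1))

-- ===== PRECONDITION & SPEC =====
-- Pre_ excludes the empty list (A raises on field[0]) and ragged grids with a row shorter
-- than the first row: there A either raises IndexError or returns 0 only because a row
-- mismatch short-circuits before the out-of-range access, while B's eager transpose raises.
def Pre_find_symmetry_column (field : List String) : Prop :=
  field ≠ [] ∧ ∀ s ∈ field, (field.headD "").toList.length ≤ s.toList.length
instance (field : List String) : Decidable (Pre_find_symmetry_column field) := by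
  unfold Pre_find_symmetry_column; infer_instance

def pvWitness_find_symmetry_column : List String := ["#..#.", "#..##"]

def Spec_find_symmetry_column (field : List String) (out : Int) : Prop := out = find_symmetry_column_alt field
instance (field : List String) (out : Int) : Decidable (Spec_find_symmetry_column field out) := by unfold Spec_find_symmetry_column; infer_instance

-- ===== CLAIM (what is proved, stated in full; the proofs are below) =====
def Claim_equal_find_symmetry_column : Prop := ∀ (field : List String), Dom_find_symmetry_column field → Pre_find_symmetry_column field → Spec_find_symmetry_column field (find_symmetry_column field)

-- ===== LEMMAS AND PROOFS =====

-- the common abstraction of both loops: first element satisfying p, mapped by f, else 0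
def pvFirst (p : Nat → Bool) (f : Nat → Int) : List Nat → Int
  | [] => 0
  | x :: r => if p x then f x else pvFirst p f r

-- the mirror predicate both loops decide, phrased on whole columns (axis between c-1 and c)
def pvMirrorB (field : List String) (w c : Nat) : Bool :=
  (List.range (min c (w - c))).all (fun i => pvCol field (c - 1 - i) == pvCol field (c + i))

theorem pvMirrorB_iff (field : List String) (w c : Nat) :
    pvMirrorB field w c = true ↔
      ∀ i < min c (w - c), pvCol field (c - 1 - i) = pvCol field (c + i) := by
  simp [pvMirrorB, List.all_eq_true, List.mem_range]

theorem pvFirst_filter (p q : Nat → Bool) (f : Nat → Int) (L : List Nat)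
    (h : ∀ x ∈ L, p x = true → q x = true) :
    pvFirst p f (L.filter q) = pvFirst p f L := by
  induction L with
  | nil => rfl
  | cons x r ih =>
    have ih' := ih (fun y hy => h y (List.mem_cons_of_mem _ hy))
    by_cases hq : q x = true
    · simp [pvFirst, hq, ih']
    · have hp : p x = false := by
        cases hpx : p x with
        | false => rfl
        | true => exact absurd (h x List.mem_cons_self hpx) hq
      simp [pvFirst, hq, hp, ih']

theorem pvFirst_map (p : Nat → Bool) (f : Nat → Int) (g : Nat → Nat) (L : List Nat) :
    pvFirst p f (L.map g) = pvFirst (fun x => p (g x)) (fun x => f (g x)) L := by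
  induction L with
  | nil => rfl
  | cons x r ih => by_cases h : p (g x) = true <;> simp [pvFirst, h, ih]

theorem pvFirst_congr (p p' : Nat → Bool) (f f' : Nat → Int) (L : List Nat)
    (hp : ∀ x ∈ L, p x = p' x) (hf : ∀ x ∈ L, f x = f' x) :
    pvFirst p f L = pvFirst p' f' L := by
  induction L with
  | nil => rfl
  | cons x r ih =>
    rw [pvFirst, pvFirst, hp x List.mem_cons_self, hf x List.mem_cons_self,
      ih (fun y hy => hp y (List.mem_cons_of_mem _ hy)) (fun y hy => hf y (List.mem_cons_of_mem _ hy))]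

-- a fold that can only switch the flag off computes an 'all'
theorem pvFoldIf (p : Nat → Bool) (L : List Nat) (b : Bool) :
    L.foldl (fun (ae : Bool) o => if p o then false else ae) b = (b && L.all fun o => !p o) := by
  induction L generalizing b with
  | nil => simp
  | cons x r ih =>
    rw [List.foldl_cons, List.all_cons,
      show (if p x then false else b) = (!p x && b) from by cases p x <;> simp, ih]
    cases p x <;> cases b <;> simp

-- columns are equal iff every row agrees at the two positions
theorem pvCol_eq_iff (field : List String) (a b : Nat) :
    pvCol field a = pvCol field b ↔
      ∀ i < field.length, pvCharA field i a = pvCharA field i b := by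
  unfold pvCol pvCharA
  rw [List.ext_getElem_iff]
  simp only [List.length_map, List.getElem_map, true_and]
  constructor
  · intro h i hi
    have := h i hi hi
    simpa [List.getD_eq_getElem?_getD, List.getElem?_eq_getElem hi] using this
  · intro h i hi _
    have := h i hi
    simpa [List.getD_eq_getElem?_getD, List.getElem?_eq_getElem hi] using this

-- A's inner verification loop computes pvMirrorB at axis sc+1
theorem pvAllEqual_eq (field : List String) (w sc : Nat) :
    ((List.range (sc + 1)).foldl (fun (ae : Bool) (offset : Nat) =>
      if (List.range field.length).any (fun i =>
           decide ((0:Int) ≤ (sc:Int) - (offset:Int) ∧ (sc:Int) + 1 + (offset:Int) < (w:Int)) &&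
           (pvCharA field i (sc - offset) != pvCharA field i (sc + 1 + offset)))
      then false else ae) true) = pvMirrorB field w (sc + 1) := by
  rw [pvFoldIf]
  rw [Bool.eq_iff_iff, Bool.true_and, List.all_eq_true, pvMirrorB_iff]
  constructor
  · intro h i hi
    rw [Nat.lt_min] at hi
    have h1 : i < sc + 1 := hi.1
    have h2 : sc + 1 + i < w := by omega
    have hh := h i (List.mem_range.mpr h1)
    simp only [Bool.not_eq_eq_eq_not, Bool.not_true, List.any_eq_false] at hh
    have heq : sc + 1 - 1 - i = sc - i := by omega
    rw [heq]
    rw [pvCol_eq_iff]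
    intro r hr
    have hthis := hh r (List.mem_range.mpr hr)
    have hg : ((0:Int) ≤ (sc:Int) - (i:Int) ∧ (sc:Int) + 1 + (i:Int) < (w:Int)) := by omega
    rw [Bool.not_eq_true, decide_eq_true hg, Bool.true_and, bne_eq_false_iff_eq] at hthis
    exact hthis
  · intro hm o ho
    rw [List.mem_range] at ho
    simp only [Bool.not_eq_eq_eq_not, Bool.not_true, List.any_eq_false]
    intro r hr
    rw [List.mem_range] at hr
    by_cases hg : ((0:Int) ≤ (sc:Int) - (o:Int) ∧ (sc:Int) + 1 + (o:Int) < (w:Int))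
    · have ho2 : o < min (sc + 1) (w - (sc + 1)) := by omega
      have hcol := hm o ho2
      have heq : sc + 1 - 1 - o = sc - o := by omega
      rw [heq] at hcol
      have := (pvCol_eq_iff field _ _).mp hcol r hr
      simp [this]
    · rw [decide_eq_false hg, Bool.false_and]
      simp

-- A's candidate loop is pvFirst over the candidate list
theorem pvGoA_eq (field : List String) (w : Nat) (L : List Nat) :
    pvGoA field field.length w L =
      pvFirst (fun sc => pvMirrorB field w (sc + 1)) (fun sc => (sc : Int) + 1) L := by
  induction L with
  | nil => rfl
  | cons sc r ih =>
    rw [pvGoA, pvFirst]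
    rw [show ((List.range (sc + 1)).foldl (fun (ae : Bool) (offset : Nat) =>
      if (List.range field.length).any (fun i =>
           decide ((0:Int) ≤ (sc:Int) - (offset:Int) ∧ (sc:Int) + 1 + (offset:Int) < (w:Int)) &&
           (pvCharA field i (sc - offset) != pvCharA field i (sc + 1 + offset)))
      then false else ae) true) = pvMirrorB field w (sc + 1) from pvAllEqual_eq field w sc, ih]

-- B's axis loop is pvFirst over the axis list (axes below w, where cols.getD hits pvCol)
theorem pvGoB_eq (field : List String) (w : Nat) (L : List Nat)
    (hL : ∀ c ∈ L, c < w) :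
    pvGoB ((List.range w).map (pvCol field)) w L =
      pvFirst (fun c => pvMirrorB field w c) (fun c => (c : Int)) L := by
  induction L with
  | nil => rfl
  | cons c r ih =>
    have hc : c < w := hL c List.mem_cons_self
    rw [pvGoB, pvFirst]
    have hget : ∀ j, j < w → ((List.range w).map (pvCol field)).getD j [] = pvCol field j := by
      intro j hj
      rw [List.getD_eq_getElem?_getD]
      simp [List.getElem?_map, List.getElem?_range hj]
    have hcheck : ((List.range (min c (w - c))).all
        (fun i => ((List.range w).map (pvCol field)).getD (c - 1 - i) [] ==
                   ((List.range w).map (pvCol field)).getD (c + i) [])) =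
        pvMirrorB field w c := by
      rw [Bool.eq_iff_iff, List.all_eq_true, pvMirrorB_iff]
      constructor
      · intro h i hi
        have hi' : i < min c (w - c) := hi
        have := h i (List.mem_range.mpr hi')
        rw [hget _ (by omega), hget _ (by omega), beq_iff_eq] at this
        exact this
      · intro hm i hi
        rw [List.mem_range] at hi
        rw [hget _ (by omega), hget _ (by omega), beq_iff_eq]
        exact hm i hi
    rw [hcheck, ih (fun x hx => hL x (List.mem_cons_of_mem _ hx))]

-- ===== VERDICT (by name: the statement is the Claim_ definition above) =====
theorem find_symmetry_column_spec : Claim_equal_find_symmetry_column := by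
  intro field _ _
  unfold Spec_find_symmetry_column
  simp only [find_symmetry_column, find_symmetry_column_alt]
  generalize (field.headD "").toList.length = w
  rw [PySem.List.foldl_append_if_eq_filter, List.nil_append, pvGoA_eq field w]
  rw [pvGoB_eq field w _ (by
    intro c hc
    have := List.mem_range'_1.mp hc
    omega)]
  rw [List.range'_eq_map_range, pvFirst_map, pvFirst_filter]
  · refine pvFirst_congr _ _ _ _ _ (fun x _ => ?_) (fun x _ => ?_)
    · simp only [Nat.add_comm x 1]
    · push_cast
      ring
  · intro j hj hp
    rw [List.mem_range] at hj
    rw [pvMirrorB_iff] at hp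
    have h0 : 0 < min (j + 1) (w - (j + 1)) := by omega
    have hcol := hp 0 h0
    simp only [Nat.add_sub_cancel, Nat.sub_zero, Nat.add_zero] at hcol
    rw [List.all_eq_true]
    intro i hi
    rw [List.mem_range] at hi
    rw [beq_iff_eq]
    exact (pvCol_eq_iff field j (j + 1)).mp hcol i hi
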